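-- pv_equiv track=rewrite | github.com/jonfriskics/advent_of_code2024 | day25.py | make_heights
-- ===== SOURCE A (Python) =====
-- def make_heights(schematic):
--     pattern = []
--     for i in schematic.strip().split("\n"):
--         l = list()
--         for s in i:
--             l.append(s)
--         pattern.append(l)
--
--     rotated = list(zip(*pattern))[::-1]
--
--     converted = []
--     for row in range(len(rotated)):
--         hash_count = 0
--         for col in range(1,len(rotated[0])-1):
--             if rotated[row][col] == '#':
--                 hash_count += 1
--         converted.append(hash_count)
--     return converted[::-1]
-- ===== SOURCE B (Python) =====
-- def make_heights(schematic):
--     lines = schematic.strip().split("\n")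
--     # width matches zip(*...)'s truncation to the shortest line
--     width = min(len(l) for l in lines)
--     counts = [0] * width
--     for row in lines[1:-1]:
--         for c in range(width):
--             if row[c] == '#':
--                 counts[c] += 1
--     return counts
-- ===== Notes on version B (the rewrite author's own statement) =====
-- stated objective: faster
-- what changed: Replaces building a char matrix, transposing it with zip(*...) and double-reversing with a single row-major pass over the interior lines that accumulates per-column hash-mark counts in one array (width = shortest line, matching zip's truncation).
import Mathlib
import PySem

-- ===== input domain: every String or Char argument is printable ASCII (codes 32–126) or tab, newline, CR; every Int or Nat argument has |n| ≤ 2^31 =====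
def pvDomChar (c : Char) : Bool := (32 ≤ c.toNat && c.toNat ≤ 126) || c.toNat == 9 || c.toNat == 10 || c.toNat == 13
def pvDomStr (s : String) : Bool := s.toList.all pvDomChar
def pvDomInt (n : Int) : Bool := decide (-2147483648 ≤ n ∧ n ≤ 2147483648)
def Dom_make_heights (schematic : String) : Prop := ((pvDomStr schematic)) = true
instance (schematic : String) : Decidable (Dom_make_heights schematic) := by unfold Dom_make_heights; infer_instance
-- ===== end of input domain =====

-- B replaces A's char-matrix transpose (zip(*...)) with two reversals by one row-major
-- pass over the interior lines accumulating per-column '#' counts (objective: simpler).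


-- ===== PORT A =====
-- zip(*ls): truncates every row to the length of the shortest one
def pyZipLen (ls : List (List Char)) : Nat :=
  match ls with
  | [] => 0
  | l :: t => t.foldl (fun m x => min m x.length) l.length

def pyZipStar (ls : List (List Char)) : List (List Char) :=
  (List.range (pyZipLen ls)).map (fun j => ls.map (fun l => l.getD j ' '))

def make_heights (schematic : String) : List Int :=
  let lines := PySem.Chars.splitOn (PySem.Chars.strip schematic.toList) ['
']
  let pattern := lines.foldl
    (fun acc i => acc ++ [i.foldl (fun l s => l ++ [s]) []]) []
  let rotated := (pyZipStar pattern).reverse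
  let converted := (List.range rotated.length).foldl
    (fun acc row =>
      acc ++ [(PySem.List.pyRange 1 (((rotated.headD []).length : Int) - 1) 1).foldl
        (fun hc col =>
          if (rotated.getD row []).getD col.toNat ' ' = '#' then hc + 1 else hc)
        (0 : Int)])
    []
  converted.reverse

-- ===== PORT B =====
def make_heights_alt (schematic : String) : List Int :=
  let lines := PySem.Chars.splitOn (PySem.Chars.strip schematic.toList) ['
']
  -- min(len(l) for l in lines): lines is never empty (split returns >= 1 piece), so getD 0 is unreachable
  let width : Int := (PySem.List.min? (lines.map (fun l => PySem.List.len l)) (fun x => x)).getD 0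
  let counts : List Int := List.replicate width.toNat 0
  (PySem.List.slice lines (some 1) (some (-1))).foldl
    (fun counts row =>
      (PySem.List.pyRange 0 width 1).foldl
        (fun counts c =>
          -- 0 <= c < width <= len(row), so row[c] is in range
          if row.getD c.toNat ' ' = '#'
          then PySem.List.pySetD counts c (PySem.List.pyGetD counts c 0 + 1)
          else counts)
        counts)
    counts

-- ===== PRECONDITION & SPEC =====
def Spec_make_heights (schematic : String) (out : List Int) : Prop := out = make_heights_alt schematic
instance (schematic : String) (out : List Int) : Decidable (Spec_make_heights schematic out) := by unfold Spec_make_heights; infer_instance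

-- ===== CLAIM (what is proved, stated in full; the proofs are below) =====
def Claim_equal_make_heights : Prop := ∀ (schematic : String), Dom_make_heights schematic → Spec_make_heights schematic (make_heights schematic)

-- ===== LEMMAS AND PROOFS =====

theorem pv_prefix_fold (r : List Char) (l : List Int) :
    ∀ (xs ys : List Int), (∀ c ∈ l, 0 ≤ c ∧ c < (xs.length : Int)) →
    l.foldl (fun cs c => if r.getD c.toNat ' ' = '#'
        then PySem.List.pySetD cs c (PySem.List.pyGetD cs c 0 + 1) else cs) (xs ++ ys)
      = l.foldl (fun cs c => if r.getD c.toNat ' ' = '#'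
        then PySem.List.pySetD cs c (PySem.List.pyGetD cs c 0 + 1) else cs) xs ++ ys := by
  induction l with
  | nil => intro xs ys _; rfl
  | cons c t ih =>
    intro xs ys h
    obtain ⟨h0, h1⟩ := h c (by simp)
    have hset : PySem.List.pySetD (xs ++ ys) c (PySem.List.pyGetD (xs ++ ys) c 0 + 1)
        = PySem.List.pySetD xs c (PySem.List.pyGetD xs c 0 + 1) ++ ys := by
      rw [PySem.List.pyGetD_eq_getElem _ _ h0 (by simp; omega),
          PySem.List.pyGetD_eq_getElem _ _ h0 (by simpa using h1),
          List.getElem_append_left (by omega),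
          PySem.List.pySetD_of_nonneg _ _ h0, PySem.List.pySetD_of_nonneg _ _ h0,
          List.set_append]
      simp [show c.toNat < xs.length by omega]
    have ht : ∀ d ∈ t, 0 ≤ d ∧ d < ((PySem.List.pySetD xs c (PySem.List.pyGetD xs c 0 + 1)).length : Int) := by
      intro d hd
      have := h d (by simp [hd])
      simpa [PySem.List.length_pySetD] using this
    have ht' : ∀ d ∈ t, 0 ≤ d ∧ d < (xs.length : Int) := fun d hd => h d (by simp [hd])
    simp only [List.foldl_cons]
    split_ifs with hc
    · rw [hset, ih _ _ ht]
    · exact ih _ _ ht'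

theorem pv_row_fold (r : List Char) (w : Nat) (g : Nat → Int) :
    (PySem.List.pyRange 0 (w : Int) 1).foldl (fun cs c => if r.getD c.toNat ' ' = '#'
        then PySem.List.pySetD cs c (PySem.List.pyGetD cs c 0 + 1) else cs)
      ((List.range w).map g)
    = (List.range w).map (fun j => if r.getD j ' ' = '#' then g j + 1 else g j) := by
  induction w generalizing g with
  | zero => simp [PySem.List.pyRange_one_eq_nil]
  | succ w ih =>
    have hmem : ∀ c ∈ PySem.List.pyRange 0 (w : Int) 1, 0 ≤ c ∧ c < (((List.range w).map g).length : Int) := by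
      intro c hc
      rw [PySem.List.mem_pyRange_one] at hc
      exact ⟨hc.1, by simpa using hc.2⟩
    have hcast : ((w + 1 : Nat) : Int) = (w : Int) + 1 := by push_cast; ring
    rw [hcast, PySem.List.pyRange_one_succ_right (by positivity), List.range_succ,
        List.map_append, List.foldl_append, pv_prefix_fold r _ _ _ hmem, ih g]
    set L := (List.range w).map fun j => if r.getD j ' ' = '#' then g j + 1 else g j with hL
    have hlen : L.length = w := by simp [hL]
    have hget : PySem.List.pyGetD (L ++ [g w]) (w : Int) 0 = g w := by
      rw [PySem.List.pyGetD_eq_getElem _ _ (by positivity) (by simp [hlen])]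
      simp [hlen]
    have hset : ∀ v, PySem.List.pySetD (L ++ [g w]) (w : Int) v = L ++ [v] := by
      intro v
      rw [PySem.List.pySetD_of_nonneg _ _ (by positivity), List.set_append]
      simp [hlen]
    simp only [List.foldl_cons, List.foldl_nil, List.map_append, List.map_cons, List.map_nil,
      Int.toNat_natCast]
    by_cases hw : r.getD w ' ' = '#'
    · rw [if_pos hw, hget, hset, if_pos hw]
    · rw [if_neg hw, if_neg hw]

theorem pv_outer_fold (w : Nat) (rows : List (List Char)) :
    ∀ (g : Nat → Int),
    rows.foldl (fun counts row => (PySem.List.pyRange 0 (w : Int) 1).foldl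
        (fun cs c => if row.getD c.toNat ' ' = '#'
          then PySem.List.pySetD cs c (PySem.List.pyGetD cs c 0 + 1) else cs) counts)
      ((List.range w).map g)
    = (List.range w).map (fun j => g j + (rows.countP (fun r => decide (r.getD j ' ' = '#')) : Int)) := by
  induction rows with
  | nil => intro g; simp
  | cons hd t ih =>
    intro g
    simp only [List.foldl_cons]
    rw [pv_row_fold hd w g, ih]
    apply List.map_congr_left
    intro j _
    by_cases h : hd.getD j ' ' = '#'
    · rw [List.countP_cons, if_pos h]
      simp only [h, decide_true, if_pos]
      push_cast; ring
    · rw [List.countP_cons, if_neg h]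
      simp only [h, decide_false]
      push_cast; ring

theorem pv_foldl_min_cast (t : List (List Char)) :
    ∀ (a : Nat), (t.map (fun x => (x.length : Int))).foldl min (a : Int)
      = ((t.foldl (fun m x => min m x.length) a : Nat) : Int) := by
  induction t with
  | nil => intro a; simp
  | cons hd t ih =>
    intro a
    simp only [List.map_cons, List.foldl_cons]
    rw [show min ((a:Int)) ((hd.length:Int)) = ((min a hd.length : Nat) : Int) by push_cast; rfl]
    exact ih (min a hd.length)

theorem pv_width_eq (lines : List (List Char)) :
    (PySem.List.min? (lines.map (fun l => PySem.List.len l)) (fun x => x)).getD 0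
      = (pyZipLen lines : Int) := by
  cases lines with
  | nil => simp [PySem.List.min?, pyZipLen]
  | cons l t =>
    rw [List.map_cons, PySem.List.min?_id_cons, Option.getD_some]
    simp only [PySem.List.len_eq, pyZipLen]
    exact pv_foldl_min_cast t l.length

theorem pv_reverse_map_range {α : Type} (w : Nat) (f : Nat → α) :
    ((List.range w).map f).reverse = (List.range w).map (fun j => f (w - 1 - j)) := by
  apply List.ext_getElem
  · simp
  · intro i h1 h2
    simp only [List.length_map, List.length_range, List.length_reverse] at h1 h2
    simp only [List.getElem_reverse, List.getElem_map, List.getElem_range, List.length_map,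
      List.length_range]

theorem pv_slice_eq (lines : List (List Char)) :
    PySem.List.slice lines (some 1) (some (-1))
      = (List.range (lines.length - 2)).map (fun k => lines.getD (1 + k) []) := by
  have h1 : PySem.List.slice lines (some 1) (some (-1)) = (lines.drop 1).take (lines.length - 2) := by
    simp only [PySem.List.slice, show (1:Int) = ((1:Nat):Int) by norm_num,
      PySem.List.clampIdx_natCast]
    cases lines with
    | nil => simp
    | cons a t => simp
  rw [h1]
  apply List.ext_getElem
  · simp; omega
  · intro i hi1 hi2
    simp only [List.length_take, List.length_drop, List.length_map, List.length_range] at hi1 hi2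
    simp only [List.getElem_take, List.getElem_drop, List.getElem_map, List.getElem_range]
    rw [List.getD_eq_getElem _ _ (by omega)]

theorem pv_foldl_min_le (t : List (List Char)) :
    ∀ (a : Nat), t.foldl (fun m x => min m x.length) a ≤ a ∧
      ∀ x ∈ t, t.foldl (fun m x => min m x.length) a ≤ x.length := by
  induction t with
  | nil => intro a; simp
  | cons hd t ih =>
    intro a
    simp only [List.foldl_cons]
    obtain ⟨h1, h2⟩ := ih (min a hd.length)
    refine ⟨le_trans h1 (by omega), ?_⟩
    intro x hx
    rcases List.mem_cons.mp hx with rfl | hx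
    · exact le_trans h1 (by omega)
    · exact h2 x hx

theorem pv_zipLen_le (ls : List (List Char)) : ∀ l ∈ ls, pyZipLen ls ≤ l.length := by
  cases ls with
  | nil => simp
  | cons hd t =>
    intro l hl
    rcases List.mem_cons.mp hl with rfl | hl
    · exact le_trans (pv_foldl_min_le t l.length).1 (le_refl _)
    · exact (pv_foldl_min_le t hd.length).2 l hl

theorem pv_main (lines : List (List Char)) :
    (let pattern := lines.foldl
        (fun acc i => acc ++ [i.foldl (fun l s => l ++ [s]) []]) []
      let rotated := (pyZipStar pattern).reverse
      let converted := (List.range rotated.length).foldl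
        (fun acc row =>
          acc ++ [(PySem.List.pyRange 1 (((rotated.headD []).length : Int) - 1) 1).foldl
            (fun hc col =>
              if (rotated.getD row []).getD col.toNat ' ' = '#' then hc + 1 else hc)
            (0 : Int)])
        []
      converted.reverse)
    =
    (let width : Int := (PySem.List.min? (lines.map (fun l => PySem.List.len l)) (fun x => x)).getD 0
      let counts : List Int := List.replicate width.toNat 0
      (PySem.List.slice lines (some 1) (some (-1))).foldl
        (fun counts row =>
          (PySem.List.pyRange 0 width 1).foldl
            (fun counts c =>
              if row.getD c.toNat ' ' = '#'
              then PySem.List.pySetD counts c (PySem.List.pyGetD counts c 0 + 1)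
              else counts)
            counts)
        counts) := by
  simp only [PySem.List.foldl_append_singleton_eq_self, List.nil_append,
    PySem.List.foldl_append_singleton_eq_map, pv_width_eq, Int.toNat_natCast]
  set w := pyZipLen lines with hw
  set col : Nat → List Char := fun j => lines.map (fun l => l.getD j ' ') with hcol
  -- LHS structure
  have hrot : (pyZipStar lines).reverse = (List.range w).map (fun j => col (w - 1 - j)) := by
    rw [pyZipStar, pv_reverse_map_range]
  rw [hrot]
  simp only [List.length_map, List.length_range]
  rw [pv_reverse_map_range]
  -- RHS structure
  rw [show List.replicate w (0 : Int) = (List.range w).map (fun _ => (0:Int)) by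
    simp [List.map_const'], pv_outer_fold]
  apply List.map_congr_left
  intro j hj
  rw [List.mem_range] at hj
  have hwpos : 0 < w := by omega
  -- the head of rotated is column (w-1), of length lines.length
  have hhead : ((List.range w).map (fun i => col (w - 1 - i))).headD [] = col (w - 1) := by
    obtain ⟨w', hw'⟩ := Nat.exists_eq_succ_of_ne_zero (Nat.pos_iff_ne_zero.mp hwpos)
    rw [hw', List.range_succ_eq_map]
    simp
  have hheadlen : (((List.range w).map (fun i => col (w - 1 - i))).headD []).length = lines.length := by
    rw [hhead, hcol]; simp
  -- the (w-1-j)-th row of rotated is column j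
  have hrow : ((List.range w).map (fun i => col (w - 1 - i))).getD (w - 1 - j) [] = col j := by
    rw [List.getD_eq_getElem _ _ (by simp; omega)]
    simp only [List.getElem_map, List.getElem_range]
    congr 1
    omega
  rw [hheadlen, hrow]
  simp only [PySem.List.foldl_ite_add_one]
  rw [pv_slice_eq, List.countP_map, PySem.List.pyRange_one, List.countP_map]
  rw [show ((lines.length : Int) - 1 - 1).toNat = lines.length - 2 by omega]
  congr 1
  congr 1
  apply List.countP_congr
  intro k hk
  rw [List.mem_range] at hk
  have h1k : 1 + k < lines.length := by omega
  have hjlen : j < lines[1 + k].length :=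
    lt_of_lt_of_le hj (pv_zipLen_le lines _ (List.getElem_mem h1k))
  simp only [Function.comp_apply, decide_eq_true_eq]
  rw [show ((1 : Int) + (k : Int)).toNat = 1 + k by omega, hcol]
  rw [List.getD_eq_getElem _ ' ' (by simpa using h1k), List.getElem_map,
      List.getD_eq_getElem _ [] h1k]

-- ===== VERDICT (by name: the statement is the Claim_ definition above) =====
theorem make_heights_spec : Claim_equal_make_heights := by
  intro s _
  unfold Spec_make_heights make_heights make_heights_alt
  exact pv_main _
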